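-- pv_equiv track=rewrite | github.com/nz2o/Mikrotik-Whitelist-Service | app/services/applicator.py | _pack_script_units
-- ===== SOURCE A (Python) =====
-- MAX_CHUNK_BYTES = 2000  # keep chunks small for better RouterOS responsiveness
--
-- def _pack_script_units(units: list[list[str]]) -> list[str]:
--     """Pack multi-line units without splitting a unit across chunks."""
--     packed: list[str] = []
--     current_units: list[list[str]] = []
--     current_bytes = 0
--     for unit in units:
--         unit_text = "\n".join(unit) + "\n"
--         unit_bytes = len(unit_text.encode("utf-8"))
--         if current_units and current_bytes + unit_bytes > MAX_CHUNK_BYTES: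
--             chunk_lines: list[str] = []
--             for u in current_units:
--                 chunk_lines.extend(u)
--             packed.append("\n".join(chunk_lines) + "\n")
--             current_units = []
--             current_bytes = 0
--         current_units.append(unit)
--         current_bytes += unit_bytes
--     if current_units:
--         chunk_lines = []
--         for u in current_units:
--             chunk_lines.extend(u)
--         packed.append("\n".join(chunk_lines) + "\n")
--     return packed
-- ===== SOURCE B (Python) =====
-- MAX_CHUNK_BYTES = 2000  # keep chunks small for better RouterOS responsiveness
--
-- def _pack_script_units(units: list[list[str]]) -> list[str]:
--     """Pack multi-line units without splitting a unit across chunks.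
--
--     Two-stage approach: first precompute a table pairing each unit with its
--     encoded byte size, then repeatedly slice off the maximal prefix of the
--     table that fits in one chunk (always at least one unit) and emit it.
--     """
--     table = [(u, len(("\n".join(u) + "\n").encode("utf-8"))) for u in units]
--     packed: list[str] = []
--     while table:
--         taken = [table[0][0]]
--         total = table[0][1]
--         rest = table[1:]
--         while rest and total + rest[0][1] <= MAX_CHUNK_BYTES:
--             taken.append(rest[0][0])
--             total += rest[0][1]
--             rest = rest[1:]
--         packed.append("\n".join(line for u in taken for line in u) + "\n")
--         table = rest
--     return packed
-- ===== Notes on version B (the rewrite author's own statement) =====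
-- stated objective: alternative
-- what changed: B first builds a (unit, byte-size) table and then repeatedly slices off the maximal fitting prefix of that table with an inner take-while (emitting one chunk per outer step), instead of A's single stateful fold that flushes the accumulated chunk when the next unit would overflow.
import Mathlib
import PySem

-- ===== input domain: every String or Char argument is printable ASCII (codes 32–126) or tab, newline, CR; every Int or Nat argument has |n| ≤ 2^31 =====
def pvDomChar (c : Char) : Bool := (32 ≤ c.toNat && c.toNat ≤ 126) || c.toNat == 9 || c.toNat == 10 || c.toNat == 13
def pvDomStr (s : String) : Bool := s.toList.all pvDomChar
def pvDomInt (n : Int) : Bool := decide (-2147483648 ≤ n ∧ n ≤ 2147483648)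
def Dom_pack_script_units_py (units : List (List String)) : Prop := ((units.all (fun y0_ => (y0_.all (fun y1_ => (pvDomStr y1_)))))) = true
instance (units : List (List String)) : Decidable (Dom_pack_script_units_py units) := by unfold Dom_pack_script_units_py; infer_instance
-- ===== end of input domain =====

-- B precomputes a (unit, byte-size) table and then repeatedly slices off the maximal fitting
-- prefix as one chunk, instead of A's stateful fold that flushes on overflow (alternative, same cost).
-- `len(text.encode("utf-8"))` is ported as PySem.Str.len text: exact on Dom's ASCII domain (every admitted char is one UTF-8 byte).

-- ===== PORT A =====
-- state: packed, current_units, current_bytes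
def packA_loop : List (List String) → List String → List (List String) → Int → List String
  | [], packed, cur, _ =>
      if cur ≠ [] then
        packed ++ [PySem.Str.join "\n" (cur.foldl (fun acc u => acc ++ u) []) ++ "\n"]
      else packed
  | unit :: rest, packed, cur, bytes =>
      let unit_text := PySem.Str.join "\n" unit ++ "\n"
      let unit_bytes := PySem.Str.len unit_text
      if cur ≠ [] ∧ bytes + unit_bytes > 2000 then
        packA_loop rest
          (packed ++ [PySem.Str.join "\n" (cur.foldl (fun acc u => acc ++ u) []) ++ "\n"])
          ([] ++ [unit]) (0 + unit_bytes)
      else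
        packA_loop rest packed (cur ++ [unit]) (bytes + unit_bytes)

def pack_script_units_py (units : List (List String)) : List String :=
  packA_loop units [] [] 0

-- ===== PORT B =====
-- the inner `while rest and total + rest[0][1] <= MAX` loop: extend taken, return (taken, rest)
def packB_fill : List (List String) → Int → List ((List String) × Int) →
    List (List String) × List ((List String) × Int)
  | taken, _, [] => (taken, [])
  | taken, total, (u, s) :: rest =>
      if total + s ≤ 2000 then packB_fill (taken ++ [u]) (total + s) rest
      else (taken, (u, s) :: rest)

-- the inner while loop only consumes its input table
theorem packB_fill_len : ∀ (taken : List (List String)) (total : Int)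
    (table : List ((List String) × Int)),
    (packB_fill taken total table).2.length ≤ table.length
  | _, _, [] => by simp [packB_fill]
  | taken, total, (u, s) :: rest => by
      simp only [packB_fill]
      split
      · have := packB_fill_len (taken ++ [u]) (total + s) rest
        simp only [List.length_cons]; omega
      · simp

-- the outer `while table:` loop: one chunk per iteration
def packB_outer : List ((List String) × Int) → List String
  | [] => []
  | (u, s) :: rest =>
      let p := packB_fill [u] s rest
      (PySem.Str.join "\n" (p.1.flatMap (fun v => v)) ++ "\n") :: packB_outer p.2
termination_by t => t.length
decreasing_by
  have := packB_fill_len [u] s rest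
  simp only [List.length_cons]
  omega

def pack_script_units_py_alt (units : List (List String)) : List String :=
  packB_outer (units.map (fun u => (u, PySem.Str.len (PySem.Str.join "\n" u ++ "\n"))))

-- ===== PRECONDITION & SPEC =====
def Spec_pack_script_units_py (units : List (List String)) (out : List String) : Prop := out = pack_script_units_py_alt units
instance (units : List (List String)) (out : List String) : Decidable (Spec_pack_script_units_py units out) := by unfold Spec_pack_script_units_py; infer_instance

-- ===== CLAIM (what is proved, stated in full; the proofs are below) =====
def Claim_equal_pack_script_units_py : Prop := ∀ (units : List (List String)), Dom_pack_script_units_py units → Spec_pack_script_units_py units (pack_script_units_py units)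

-- ===== LEMMAS AND PROOFS =====

-- A's per-flush rebuild of chunk_lines equals B's flatten of the taken units
theorem flatten_eq (cur : List (List String)) :
    cur.foldl (fun acc u => acc ++ u) [] = cur.flatMap (fun v => v) := by
  induction cur using List.reverseRecOn with
  | nil => simp
  | append_singleton xs x ih => simp [List.foldl_append, ih]

-- core invariant: A's loop with a non-empty current chunk (taken, total) and remaining
-- units `rest` produces exactly B's maximal-prefix chunking continued from that state
theorem loop_eq : ∀ (rest : List (List String)) (taken : List (List String))
    (total : Int) (packed : List String), taken ≠ [] →
    packA_loop rest packed taken total =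
      packed ++
        (let p := packB_fill taken total
            (rest.map (fun u => (u, PySem.Str.len (PySem.Str.join "\n" u ++ "\n"))));
         (PySem.Str.join "\n" (p.1.flatMap (fun v => v)) ++ "\n") :: packB_outer p.2)
  | [], taken, total, packed, h => by
      simp only [List.map_nil, packB_fill]
      rw [packB_outer.eq_def]
      simp [packA_loop, h, flatten_eq]
  | unit :: rest, taken, total, packed, h => by
      simp only [packA_loop, List.map_cons]
      by_cases hb : total + PySem.Str.len (PySem.Str.join "\n" unit ++ "\n") > 2000
      · rw [if_pos ⟨h, hb⟩]
        simp only [List.nil_append]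
        rw [loop_eq rest [unit] (0 + PySem.Str.len (PySem.Str.join "\n" unit ++ "\n"))
            (packed ++ [PySem.Str.join "\n" (taken.foldl (fun acc u => acc ++ u) []) ++ "\n"])
            (by simp)]
        simp only [packB_fill, if_neg (by omega : ¬ total + PySem.Str.len (PySem.Str.join "\n" unit ++ "\n") ≤ 2000)]
        conv_rhs => rw [packB_outer.eq_def]
        simp [flatten_eq, List.flatMap]
      · rw [if_neg (by tauto)]
        rw [loop_eq rest (taken ++ [unit])
            (total + PySem.Str.len (PySem.Str.join "\n" unit ++ "\n")) packed (by simp)]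
        simp only [packB_fill, if_pos (by omega : total + PySem.Str.len (PySem.Str.join "\n" unit ++ "\n") ≤ 2000)]

-- ===== VERDICT (by name: the statement is the Claim_ definition above) =====
theorem pack_script_units_py_spec : Claim_equal_pack_script_units_py := by
  intro units _
  show pack_script_units_py units = pack_script_units_py_alt units
  cases units with
  | nil =>
      show packA_loop [] [] [] 0 = packB_outer []
      rw [packB_outer.eq_def]; rfl
  | cons u rest =>
      unfold pack_script_units_py pack_script_units_py_alt
      simp only [packA_loop, ne_eq, not_true_eq_false, false_and, if_false, List.nil_append,
        List.map_cons]
      rw [packB_outer.eq_def]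
      have := loop_eq rest [u] (0 + PySem.Str.len (PySem.Str.join "\n" u ++ "\n")) [] (by simp)
      simpa using this
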